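-- pv_equiv track=rewrite | github.com/sasnl/temporal_integration | isc/run_isc_behavior_corr.py | get_pairwise_indices
-- ===== SOURCE A (Python) =====
-- def get_pairwise_indices(n_subjects):
--     """
--     Returns a list of lists, where list[i] contains the indices of all pairs involving subject i.
--     Assumes standard upper-triangle unraveling (0,1), (0,2)... (0,N-1), (1,2)...
--     """
--     pair_indices = [[] for _ in range(n_subjects)]
--     idx = 0
--     for i in range(n_subjects):
--         for j in range(i + 1, n_subjects):
--             pair_indices[i].append(idx)
--             pair_indices[j].append(idx)
--             idx += 1
--     return pair_indices
-- ===== SOURCE B (Python) =====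
-- def get_pairwise_indices(n_subjects):
--     """
--     Returns a list of lists, where list[k] contains the indices of all pairs involving subject k.
--     Each row is computed independently from the closed-form upper-triangle pair index.
--     """
--     result = []
--     for k in range(n_subjects):
--         row = []
--         for p in range(n_subjects):
--             if p == k:
--                 continue
--             i, j = (k, p) if k < p else (p, k)
--             row.append(i * (2 * n_subjects - i - 1) // 2 + (j - i - 1))
--         result.append(row)
--     return result
-- ===== Notes on version B (the rewrite author's own statement) =====
-- stated objective: alternative
-- what changed: B computes each subject's row independently via the closed-form upper-triangle index of each pair, instead of A's shared running pair counter that appends to two rows per pair.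
import Mathlib
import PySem

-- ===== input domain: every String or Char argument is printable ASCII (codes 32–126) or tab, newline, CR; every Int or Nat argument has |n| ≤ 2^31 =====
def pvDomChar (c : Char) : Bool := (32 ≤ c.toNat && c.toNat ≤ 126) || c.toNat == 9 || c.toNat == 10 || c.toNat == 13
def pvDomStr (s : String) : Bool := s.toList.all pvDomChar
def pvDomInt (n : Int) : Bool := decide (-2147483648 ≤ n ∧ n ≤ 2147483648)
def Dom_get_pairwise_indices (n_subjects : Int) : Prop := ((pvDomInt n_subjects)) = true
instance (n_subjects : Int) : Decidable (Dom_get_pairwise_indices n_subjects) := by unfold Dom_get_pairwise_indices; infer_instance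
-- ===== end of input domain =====

-- B replaces A's shared running pair counter (two appends per pair) by an independent
-- per-subject row built from the closed-form upper-triangle pair index; same cost, different algorithm.

-- ===== PORT A =====
-- Python 'rows[i].append(x)': in A, i is always a valid non-negative index, where modify is exact.
def pyAppendAt (rows : List (List Int)) (i : Int) (x : Int) : List (List Int) :=
  rows.modify i.toNat (fun r => r ++ [x])

def get_pairwise_indices (n_subjects : Int) : List (List Int) :=
  -- pair_indices = [[] for _ in range(n_subjects)]
  let pair_indices : List (List Int) :=
    (PySem.List.pyRange 0 n_subjects 1).foldl (fun acc _ => acc ++ [([] : List Int)]) []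
  -- idx = 0; for i in range(n): for j in range(i+1, n): append idx to rows i and j; idx += 1
  let st :=
    (PySem.List.pyRange 0 n_subjects 1).foldl
      (fun (st : List (List Int) × Int) i =>
        (PySem.List.pyRange (i + 1) n_subjects 1).foldl
          (fun (st : List (List Int) × Int) j =>
            (pyAppendAt (pyAppendAt st.1 i st.2) j st.2, st.2 + 1)) st)
      (pair_indices, 0)
  st.1

-- ===== PORT B =====
def get_pairwise_indices_alt (n_subjects : Int) : List (List Int) :=
  (PySem.List.pyRange 0 n_subjects 1).foldl
    (fun result k =>
      result ++
        [(PySem.List.pyRange 0 n_subjects 1).foldl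
          (fun row p =>
            if p = k then row
            else
              let i := if k < p then k else p
              let j := if k < p then p else k
              row ++ [PySem.Int.floordiv (i * (2 * n_subjects - i - 1)) 2 + (j - i - 1)])
          []])
    []

-- ===== PRECONDITION & SPEC =====
def Spec_get_pairwise_indices (n_subjects : Int) (out : List (List Int)) : Prop := out = get_pairwise_indices_alt n_subjects
instance (n_subjects : Int) (out : List (List Int)) : Decidable (Spec_get_pairwise_indices n_subjects out) := by unfold Spec_get_pairwise_indices; infer_instance

-- ===== CLAIM (what is proved, stated in full; the proofs are below) =====
def Claim_equal_get_pairwise_indices : Prop := ∀ (n_subjects : Int), Dom_get_pairwise_indices n_subjects → Spec_get_pairwise_indices n_subjects (get_pairwise_indices n_subjects)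

-- ===== LEMMAS AND PROOFS =====

-- the closed-form upper-triangle pair index used by B
def idxI (n i j : Int) : Int := PySem.Int.floordiv (i * (2 * n - i - 1)) 2 + (j - i - 1)

-- model: the entry row k contributes for partner p, after the outer loop has processed i = 0 .. m-1
def rowF (n m k p : Int) : Option Int :=
  if p = k then none
  else if p < k then (if p < m then some (idxI n p k) else none)
  else (if k < m then some (idxI n k p) else none)

-- model: row of subject k after the outer loop has processed i = 0 .. m-1
def rowM (n m k : Int) : List Int := (PySem.List.pyRange 0 n 1).filterMap (rowF n m k)

lemma idxI_spec (n i j : Int) : 2 * idxI n i j = i * (2 * n - i - 1) + 2 * (j - i - 1) := by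
  have hdvd : (2 : Int) ∣ i * (2 * n - i - 1) := by
    rcases Int.even_or_odd i with he | ho
    · exact (he.mul_right _).two_dvd
    · obtain ⟨t, ht⟩ := ho
      exact Dvd.dvd.mul_left ⟨n - t - 1, by omega⟩ i
  unfold idxI
  rw [PySem.Int.floordiv_eq_ediv_of_pos (by norm_num)]
  obtain ⟨t, ht⟩ := hdvd
  rw [ht, Int.mul_ediv_cancel_left _ (by norm_num)]
  ring

lemma length_pyAppendAt (rows : List (List Int)) (i x : Int) :
    (pyAppendAt rows i x).length = rows.length := by
  simp [pyAppendAt]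

lemma getD_pyAppendAt (rows : List (List Int)) (i x : Int) (k : Nat) (hi : 0 ≤ i) :
    (pyAppendAt rows i x).getD k [] =
      if (k : Int) = i ∧ k < rows.length then rows.getD k [] ++ [x] else rows.getD k [] := by
  have hik : ((k : Int) = i) ↔ (i.toNat = k) := by omega
  simp only [pyAppendAt, List.getD_eq_getElem?_getD, List.getElem?_modify]
  by_cases hk : k < rows.length
  · rw [List.getElem?_eq_getElem hk]
    by_cases h : (k : Int) = i
    · simp [h, hik.mp h, hk]
    · have h2 : ¬ (i.toNat = k) := fun hh => h (hik.mpr hh)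
      simp [h, h2]
  · rw [List.getElem?_eq_none (by omega)]
    simp [hk]

lemma innerA (n i : Int) (hi : 0 ≤ i) :
    ∀ (fuel : Nat) (s : Int) (rows : List (List Int)) (c : Int),
      (n - s).toNat = fuel → i < s →
      (let res := (PySem.List.pyRange s n 1).foldl
          (fun (st : List (List Int) × Int) j =>
            (pyAppendAt (pyAppendAt st.1 i st.2) j st.2, st.2 + 1)) (rows, c)
       res.1.length = rows.length ∧ res.2 = c + ((n - s).toNat : Int) ∧
       ∀ k : Nat, k < rows.length →
         res.1.getD k [] = rows.getD k [] ++
           (if (k : Int) = i then (PySem.List.pyRange s n 1).map (fun j => c + (j - s))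
            else if s ≤ (k : Int) ∧ (k : Int) < n then [c + ((k : Int) - s)] else [])) := by
  intro fuel
  induction fuel with
  | zero =>
    intro s rows c h0 his
    have hns : n ≤ s := by omega
    simp only [PySem.List.pyRange_one_eq_nil hns, List.foldl_nil, List.map_nil]
    refine ⟨trivial, by omega, ?_⟩
    intro k hk
    split_ifs with h1 h2
    · simp
    · omega
    · simp
  | succ fuel ih =>
    intro s rows c h0 his
    have hsn : s < n := by omega
    rw [PySem.List.pyRange_one_cons hsn]
    simp only [List.foldl_cons, List.map_cons]
    set rows' := pyAppendAt (pyAppendAt rows i c) s c with hrows'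
    obtain ⟨hlen, hcnt, hget⟩ := ih (s + 1) rows' (c + 1) (by omega) (by omega)
    have hlen' : rows'.length = rows.length := by
      simp [hrows', length_pyAppendAt]
    refine ⟨by rw [hlen, hlen'], by rw [hcnt]; omega, ?_⟩
    intro k hk
    rw [hget k (by omega)]
    have hg1 : (pyAppendAt rows i c).getD k [] =
        if (k : Int) = i ∧ k < rows.length then rows.getD k [] ++ [c] else rows.getD k [] :=
      getD_pyAppendAt rows i c k hi
    have hg2 : rows'.getD k [] =
        if (k : Int) = s ∧ k < (pyAppendAt rows i c).length
        then (pyAppendAt rows i c).getD k [] ++ [c] else (pyAppendAt rows i c).getD k [] :=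
      getD_pyAppendAt _ s c k (by omega)
    rw [length_pyAppendAt] at hg2
    by_cases hki : (k : Int) = i
    · rw [hg2, if_neg (by omega : ¬((k : Int) = s ∧ k < rows.length)),
        hg1, if_pos (⟨hki, hk⟩ : (k : Int) = i ∧ k < rows.length), if_pos hki, if_pos hki]
      have hf : (fun j => c + 1 + (j - (s + 1))) = (fun j : Int => c + (j - s)) := by
        funext j; ring
      rw [hf]
      simp [List.append_assoc]
    · by_cases hks : (k : Int) = s
      · rw [hg2, if_pos (⟨hks, hk⟩ : (k : Int) = s ∧ k < rows.length),
          hg1, if_neg (by omega : ¬((k : Int) = i ∧ k < rows.length)),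
          if_neg hki, if_neg hki,
          if_neg (by omega : ¬(s + 1 ≤ (k : Int) ∧ (k : Int) < n)),
          if_pos (by omega : s ≤ (k : Int) ∧ (k : Int) < n)]
        have hc : c + ((k : Int) - s) = c := by omega
        rw [hc]
        simp
      · rw [hg2, if_neg (by omega : ¬((k : Int) = s ∧ k < rows.length)),
          hg1, if_neg (by omega : ¬((k : Int) = i ∧ k < rows.length)),
          if_neg hki, if_neg hki]
        by_cases hin : s + 1 ≤ (k : Int) ∧ (k : Int) < n
        · rw [if_pos hin, if_pos (by omega : s ≤ (k : Int) ∧ (k : Int) < n)]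
          have hc : c + 1 + ((k : Int) - (s + 1)) = c + ((k : Int) - s) := by ring
          rw [hc]
        · rw [if_neg hin, if_neg (by omega : ¬(s ≤ (k : Int) ∧ (k : Int) < n))]

lemma filterMap_some_eq_map {A B : Type} (g : A → B) (l : List A) :
    l.filterMap (fun x => some (g x)) = l.map g := by
  induction l with
  | nil => rfl
  | cons x t ih => simp [ih]

lemma rowM_succ (n m : Int) (hm0 : 0 ≤ m) (hmn : m < n) (k : Int) (hk0 : 0 ≤ k) (hk : k < n) :
    rowM n (m + 1) k = rowM n m k ++
      (if k = m then (PySem.List.pyRange (m + 1) n 1).map (fun j => idxI n m j)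
       else if m + 1 ≤ k ∧ k < n then [idxI n m k] else []) := by
  unfold rowM
  rcases lt_trichotomy k m with hlt | heq | hgt
  · rw [if_neg (by omega : ¬ k = m), if_neg (by omega : ¬ (m + 1 ≤ k ∧ k < n)), List.append_nil]
    apply List.filterMap_congr
    intro p hp
    unfold rowF
    split_ifs <;> first | rfl | omega
  · subst heq
    rw [if_pos rfl,
      PySem.List.pyRange_one_append 0 (k + 1) n (by omega) (by omega),
      List.filterMap_append, List.filterMap_append]
    have hfront : ∀ p ∈ PySem.List.pyRange 0 (k + 1) 1, rowF n (k + 1) k p = rowF n k k p := by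
      intro p hp
      rw [PySem.List.mem_pyRange_one] at hp
      unfold rowF
      split_ifs <;> first | rfl | omega
    have hback1 : (PySem.List.pyRange (k + 1) n 1).filterMap (rowF n (k + 1) k) =
        (PySem.List.pyRange (k + 1) n 1).map (fun j => idxI n k j) := by
      rw [← filterMap_some_eq_map]
      apply List.filterMap_congr
      intro p hp
      rw [PySem.List.mem_pyRange_one] at hp
      unfold rowF
      split_ifs <;> first | rfl | omega
    have hback2 : (PySem.List.pyRange (k + 1) n 1).filterMap (rowF n k k) = [] := by
      rw [List.filterMap_eq_nil_iff]
      intro p hp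
      rw [PySem.List.mem_pyRange_one] at hp
      unfold rowF
      split_ifs <;> first | rfl | omega
    rw [List.filterMap_congr hfront, hback1, hback2, List.append_nil]
  · rw [if_neg (by omega : ¬ k = m), if_pos (⟨by omega, hk⟩ : m + 1 ≤ k ∧ k < n),
      PySem.List.pyRange_one_append 0 m n (by omega) (by omega),
      List.filterMap_append, List.filterMap_append,
      PySem.List.pyRange_one_cons (by omega : m < n),
      List.filterMap_cons, List.filterMap_cons]
    have hh1 : rowF n (m + 1) k m = some (idxI n m k) := by
      unfold rowF
      split_ifs <;> first | rfl | omega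
    have hh2 : rowF n m k m = none := by
      unfold rowF
      split_ifs <;> first | rfl | omega
    have hfront : ∀ p ∈ PySem.List.pyRange 0 m 1, rowF n (m + 1) k p = rowF n m k p := by
      intro p hp
      rw [PySem.List.mem_pyRange_one] at hp
      unfold rowF
      split_ifs <;> first | rfl | omega
    have htail1 : (PySem.List.pyRange (m + 1) n 1).filterMap (rowF n (m + 1) k) = [] := by
      rw [List.filterMap_eq_nil_iff]
      intro p hp
      rw [PySem.List.mem_pyRange_one] at hp
      unfold rowF
      split_ifs <;> first | rfl | omega
    have htail2 : (PySem.List.pyRange (m + 1) n 1).filterMap (rowF n m k) = [] := by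
      rw [List.filterMap_eq_nil_iff]
      intro p hp
      rw [PySem.List.mem_pyRange_one] at hp
      unfold rowF
      split_ifs <;> first | rfl | omega
    rw [hh1, hh2, List.filterMap_congr hfront, htail1, htail2]
    simp

lemma initA (n : Int) :
    ((PySem.List.pyRange 0 n 1).foldl (fun acc _ => acc ++ [([] : List Int)]) []).length = n.toNat ∧
      ∀ k : Nat,
        ((PySem.List.pyRange 0 n 1).foldl (fun acc _ => acc ++ [([] : List Int)]) []).getD k [] = [] := by
  rw [PySem.List.foldl_append_singleton_eq_map]
  constructor
  · simp [PySem.List.length_pyRange_one]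
  · intro k
    rw [List.nil_append, List.getD_eq_getElem?_getD, List.getElem?_map]
    cases (PySem.List.pyRange 0 n 1)[k]? <;> simp

def pvResA (n m : Int) : List (List Int) × Int :=
  (PySem.List.pyRange 0 m 1).foldl
    (fun (st : List (List Int) × Int) i =>
      (PySem.List.pyRange (i + 1) n 1).foldl
        (fun (st : List (List Int) × Int) j =>
          (pyAppendAt (pyAppendAt st.1 i st.2) j st.2, st.2 + 1)) st)
    ((PySem.List.pyRange 0 n 1).foldl (fun acc _ => acc ++ [([] : List Int)]) [], 0)

lemma outerA (n : Int) (m : Nat) (hm : (m : Int) ≤ n) :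
    (pvResA n (m : Int)).1.length = n.toNat ∧
      2 * (pvResA n (m : Int)).2 = (m : Int) * (2 * n - (m : Int) - 1) ∧
      ∀ k : Nat, k < n.toNat → (pvResA n (m : Int)).1.getD k [] = rowM n (m : Int) (k : Int) := by
  induction m with
  | zero =>
    obtain ⟨hl, hg⟩ := initA n
    have h0 : pvResA n ((0 : Nat) : Int) =
        ((PySem.List.pyRange 0 n 1).foldl (fun acc _ => acc ++ [([] : List Int)]) [], 0) := by
      unfold pvResA
      rw [Nat.cast_zero, PySem.List.pyRange_one_eq_nil (le_refl (0 : Int)), List.foldl_nil]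
    rw [h0]
    refine ⟨hl, by ring, ?_⟩
    intro k hk
    rw [hg k]
    symm
    unfold rowM
    rw [List.filterMap_eq_nil_iff]
    intro p hp
    rw [PySem.List.mem_pyRange_one] at hp
    unfold rowF
    split_ifs <;> first | rfl | omega
  | succ m ih =>
    have hm' : (m : Int) ≤ n := by push_cast at hm; omega
    obtain ⟨hl, hc, hg⟩ := ih hm'
    have hmn : (m : Int) < n := by push_cast at hm; omega
    have hcast : ((m + 1 : Nat) : Int) = (m : Int) + 1 := by push_cast; ring
    have hsplit : pvResA n ((m + 1 : Nat) : Int) =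
        (PySem.List.pyRange ((m : Int) + 1) n 1).foldl
          (fun (st : List (List Int) × Int) j =>
            (pyAppendAt (pyAppendAt st.1 (m : Int) st.2) j st.2, st.2 + 1)) (pvResA n (m : Int)) := by
      unfold pvResA
      rw [hcast, PySem.List.pyRange_one_succ_right (by positivity), List.foldl_append,
        List.foldl_cons, List.foldl_nil]
    have H := innerA n (m : Int) (by positivity) ((n - ((m : Int) + 1)).toNat) ((m : Int) + 1)
      (pvResA n (m : Int)).1 (pvResA n (m : Int)).2 rfl (by omega)
    simp only [Prod.mk.eta] at H
    obtain ⟨hl2, hc2, hg2⟩ := H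
    rw [hsplit, hcast]
    refine ⟨by rw [hl2, hl], ?_, ?_⟩
    · rw [hc2]
      have hT : ((n - ((m : Int) + 1)).toNat : Int) = n - (m : Int) - 1 := by omega
      rw [hT]
      nlinarith [hc]
    · intro k hk
      rw [hg2 k (by rw [hl]; exact hk), hg k hk,
        rowM_succ n (m : Int) (by positivity) hmn (k : Int) (by positivity) (by omega)]
      congr 1
      by_cases hkm : (k : Int) = (m : Int)
      · rw [if_pos hkm, if_pos hkm]
        have hf : (fun j => (pvResA n (m : Int)).2 + (j - ((m : Int) + 1))) =
            fun j => idxI n (m : Int) j := by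
          funext j
          have h1 := idxI_spec n (m : Int) j
          linarith [hc]
        rw [hf]
      · rw [if_neg hkm, if_neg hkm]
        by_cases h2 : (m : Int) + 1 ≤ (k : Int) ∧ (k : Int) < n
        · rw [if_pos h2, if_pos h2]
          have hv : (pvResA n (m : Int)).2 + ((k : Int) - ((m : Int) + 1)) =
              idxI n (m : Int) (k : Int) := by
            have h1 := idxI_spec n (m : Int) (k : Int)
            linarith [hc]
          rw [hv]
        · rw [if_neg h2, if_neg h2]

lemma foldl_skip_if {a b : Type} (q : a → Prop) [DecidablePred q] (f : a → b) :
    ∀ (l : List a) (acc : List b),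
      l.foldl (fun acc x => if q x then acc else acc ++ [f x]) acc =
        acc ++ l.filterMap (fun x => if q x then none else some (f x)) := by
  intro l
  induction l with
  | nil => simp
  | cons x t ih => intro acc; by_cases h : q x <;> simp [h, ih]

lemma altB (n : Int) :
    get_pairwise_indices_alt n = (PySem.List.pyRange 0 n 1).map (fun k => rowM n n k) := by
  unfold get_pairwise_indices_alt
  rw [PySem.List.foldl_append_singleton_eq_map, List.nil_append]
  apply List.map_congr_left
  intro k hk
  rw [PySem.List.mem_pyRange_one] at hk
  rw [foldl_skip_if (fun p => p = k)
    (fun p => PySem.Int.floordiv ((if k < p then k else p) * (2 * n - (if k < p then k else p) - 1)) 2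
      + ((if k < p then p else k) - (if k < p then k else p) - 1)), List.nil_append]
  unfold rowM
  apply List.filterMap_congr
  intro p hp
  rw [PySem.List.mem_pyRange_one] at hp
  unfold rowF idxI
  split_ifs <;> first | rfl | omega

-- ===== VERDICT (by name: the statement is the Claim_ definition above) =====
theorem get_pairwise_indices_spec : Claim_equal_get_pairwise_indices := by
  intro n _
  unfold Spec_get_pairwise_indices
  rcases (by omega : n ≤ 0 ∨ 0 < n) with hn | hn
  · have hnil : PySem.List.pyRange 0 n 1 = [] := PySem.List.pyRange_one_eq_nil hn
    unfold get_pairwise_indices get_pairwise_indices_alt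
    rw [hnil]
    simp
  · have hA : get_pairwise_indices n = (pvResA n n).1 := rfl
    have hcast : ((n.toNat : Nat) : Int) = n := by omega
    obtain ⟨hl, -, hg⟩ := outerA n n.toNat (by omega)
    rw [hcast] at hl hg
    rw [hA, altB n]
    apply List.ext_getElem
    · rw [hl]
      simp [PySem.List.length_pyRange_one]
    · intro t h1 h2
      have hlt : t < n.toNat := by rw [← hl]; exact h1
      rw [← List.getD_eq_getElem _ [] h1, hg t hlt, List.getElem_map,
        PySem.List.getElem_pyRange_one, zero_add]
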